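-- pv_equiv track=rewrite | github.com/LoicFocraud/Challenges_semaine | Challenge_2023-09-02_Calculatrice_romaine.py | add_romans
-- ===== SOURCE A (Python) =====
-- def conv_rom_ara(rom:str)->int:
--     '''Fonction permettant de convertir les nombres en chiffres romains "rom"
--     en nombres en chiffres arabes "ara" '''
--     conv = {"I": 1, "V": 5, "X": 10, "L": 50, "C": 100, "D": 500, "M": 1000}
--     ara = prio = 0
--     for chiffre in rom[::-1]: #Les nombres romains, c'est comme les mangas,
--         if conv[chiffre] >= prio: # on les lit de droite à gauche :-)
--             ara += conv[chiffre]
--         else :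
--             ara -= conv[chiffre]
--         prio = conv[chiffre]
--     return ara
--
-- def conv_ara_rom(ara:int)->str:
--     '''Fonction permettant de convertir les nombres en chiffres arabes "ara"
--     nombres en chiffres romains "rom" '''
--     conv2 ={'M': 1000, 'CM': 900, 'D': 500, 'CD': 400, 'C': 100, 'XC': 90, 'L': 50, 'XL': 40, 'X': 10, 'IX': 9, 'V': 5, 'IV': 4, 'I': 1}
--     rom = ""
--     for key in conv2.keys():
--         div = ara//conv2[key]
--         rom = rom + div*key
--         ara -= div*conv2[key]
--     return rom
--
-- def add_romans(calculate:str)->str: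
--     '''Fonction permettant de calculer la somme
--      de deux ou plusieurs nombres écrits en chiffres romains.'''
--     operation = calculate.split("+")
--     resultat = 0
--     for number in operation:
--         resultat += conv_rom_ara(number)
--     if resultat > 3999:
--         return "erreur (débordement, doit respecter la plage de I à MMMCMXCIX inclus)"
--     resultat = conv_ara_rom(resultat)
--     return resultat
-- ===== SOURCE B (Python) =====
-- def conv_rom_ara_fwd(rom: str) -> int:
--     """Forward pass: a symbol is subtracted when its value is smaller
--     than the value of the symbol immediately to its right."""
--     vals = {"I": 1, "V": 5, "X": 10, "L": 50, "C": 100, "D": 500, "M": 1000}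
--     total = 0
--     for i, ch in enumerate(rom):
--         v = vals[ch]
--         if i + 1 < len(rom) and v < vals[rom[i + 1]]:
--             total -= v
--         else:
--             total += v
--     return total
--
-- UNITS = ["", "I", "II", "III", "IV", "V", "VI", "VII", "VIII", "IX"]
-- TENS = ["", "X", "XX", "XXX", "XL", "L", "LX", "LXX", "LXXX", "XC"]
-- HUNDREDS = ["", "C", "CC", "CCC", "CD", "D", "DC", "DCC", "DCCC", "CM"]
-- THOUSANDS = ["", "M", "MM", "MMM"]
--
-- def add_romans(calculate: str) -> str:
--     total = sum(conv_rom_ara_fwd(p) for p in calculate.split("+"))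
--     if total > 3999:
--         return "erreur (débordement, doit respecter la plage de I à MMMCMXCIX inclus)"
--     return (THOUSANDS[total // 1000] + HUNDREDS[total // 100 % 10]
--             + TENS[total // 10 % 10] + UNITS[total % 10])
-- ===== Notes on version B (the rewrite author's own statement) =====
-- stated objective: idiomatic
-- what changed: arabic-to-roman is computed by positional digit decomposition over four lookup tables (thousands/hundreds/tens/units) instead of the greedy subtractive-pair loop, and roman-to-arabic is a left-to-right pass comparing each symbol to its right neighbour instead of the reversed loop with a previous-value accumulator.
import Mathlib
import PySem

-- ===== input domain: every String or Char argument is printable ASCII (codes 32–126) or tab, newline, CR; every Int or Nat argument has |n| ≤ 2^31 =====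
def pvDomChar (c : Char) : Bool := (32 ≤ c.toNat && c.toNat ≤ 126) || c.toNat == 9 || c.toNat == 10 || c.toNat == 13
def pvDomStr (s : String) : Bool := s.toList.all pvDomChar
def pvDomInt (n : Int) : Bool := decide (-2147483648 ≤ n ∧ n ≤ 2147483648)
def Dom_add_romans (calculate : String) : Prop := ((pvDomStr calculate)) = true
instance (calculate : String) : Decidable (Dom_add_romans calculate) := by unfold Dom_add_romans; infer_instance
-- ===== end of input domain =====

-- B replaces A's greedy subtractive-pair loop for arabic→roman by a positional digit
-- decomposition over four lookup tables, and reads roman numerals left-to-right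
-- comparing each symbol to its right neighbour (objective: idiomatic; same cost).

-- ===== PORT A =====
-- conv = {"I": 1, ...}; conv[chiffre] raises KeyError on any other character —
-- those inputs are excluded by Pre_, the port returns getD 0 there.
def pvConvA : PySem.Dict Char Int :=
  PySem.Dict.ofList [('I',1),('V',5),('X',10),('L',50),('C',100),('D',500),('M',1000)]

-- loop body of conv_rom_ara: state (ara, value of the previously read symbol)
def pvStepA (st : Int × Int) (c : Char) : Int × Int :=
  let v := pvConvA.getD c 0
  (if v ≥ st.2 then st.1 + v else st.1 - v, v)

-- for chiffre in rom[::-1] : iterate over the reversed characters (PySem.List.slice?_none_none_neg_one: s[::-1] is reverse)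
def conv_rom_ara (rom : String) : Int :=
  (rom.toList.reverse.foldl pvStepA (0, 0)).1

def pvConv2 : List (List Char × Int) :=
  [(['M'],1000),(['C','M'],900),(['D'],500),(['C','D'],400),(['C'],100),(['X','C'],90),
   (['L'],50),(['X','L'],40),(['X'],10),(['I','X'],9),(['V'],5),(['I','V'],4),(['I'],1)]

-- loop body of conv_ara_rom: state (rom as chars, ara); rom + div*key via pyRepeat
def pvStepB (st : List Char × Int) (kv : List Char × Int) : List Char × Int :=
  let div := PySem.Int.floordiv st.2 kv.2
  (st.1 ++ PySem.List.pyRepeat kv.1 div, st.2 - div * kv.2)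

def conv_ara_rom (ara : Int) : String :=
  String.ofList ((pvConv2.foldl pvStepB ([], ara)).1)

def add_romans (calculate : String) : String :=
  let operation := (PySem.Str.split? calculate "+").getD []   -- separator nonempty, never none
  let resultat := operation.foldl (fun acc number => acc + conv_rom_ara number) 0
  if resultat > 3999 then
    "erreur (débordement, doit respecter la plage de I à MMMCMXCIX inclus)"
  else conv_ara_rom resultat

-- ===== PORT B =====
-- vals[ch] raises KeyError on any other character — excluded by Pre_, getD 0 there.
def pvValsB : PySem.Dict Char Int :=
  PySem.Dict.ofList [('I',1),('V',5),('X',10),('L',50),('C',100),('D',500),('M',1000)]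

def pvValB (c : Char) : Int := pvValsB.getD c 0

-- forward pass: subtract a symbol whose value is below its right neighbour's
def pvRomToAra : List Char → Int
  | [] => 0
  | [c] => pvValB c
  | c :: d :: rest =>
      (if pvValB c < pvValB d then 0 - pvValB c else pvValB c) + pvRomToAra (d :: rest)

def pvUnits : List (List Char) :=
  [[],['I'],['I','I'],['I','I','I'],['I','V'],['V'],['V','I'],['V','I','I'],['V','I','I','I'],['I','X']]
def pvTens : List (List Char) :=
  [[],['X'],['X','X'],['X','X','X'],['X','L'],['L'],['L','X'],['L','X','X'],['L','X','X','X'],['X','C']]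
def pvHundreds : List (List Char) :=
  [[],['C'],['C','C'],['C','C','C'],['C','D'],['D'],['D','C'],['D','C','C'],['D','C','C','C'],['C','M']]
def pvThousands : List (List Char) := [[],['M'],['M','M'],['M','M','M']]

-- THOUSANDS[total//1000] + HUNDREDS[total//100%10] + TENS[total//10%10] + UNITS[total%10]
def pvTable (total : Int) : String :=
  String.ofList (
    PySem.List.pyGetD pvThousands (PySem.Int.floordiv total 1000) [] ++
    PySem.List.pyGetD pvHundreds (PySem.Int.mod (PySem.Int.floordiv total 100) 10) [] ++
    PySem.List.pyGetD pvTens (PySem.Int.mod (PySem.Int.floordiv total 10) 10) [] ++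
    PySem.List.pyGetD pvUnits (PySem.Int.mod total 10) [])

def add_romans_alt (calculate : String) : String :=
  let total := (((PySem.Str.split? calculate "+").getD []).map (fun p => pvRomToAra p.toList)).sum
  if total > 3999 then
    "erreur (débordement, doit respecter la plage de I à MMMCMXCIX inclus)"
  else pvTable total

-- ===== PRECONDITION & SPEC =====
-- Pre_ excludes exactly the inputs on which A's dict lookup raises KeyError:
-- any character other than the seven roman symbols and the plus separator.
def Pre_add_romans (calculate : String) : Prop :=
  (calculate.toList.all (fun c => c ∈ (['I','V','X','L','C','D','M','+'] : List Char))) = true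
instance (calculate : String) : Decidable (Pre_add_romans calculate) := by
  unfold Pre_add_romans; infer_instance

def pvWitness_add_romans : String := "XIV+VI"

def Spec_add_romans (calculate : String) (out : String) : Prop := out = add_romans_alt calculate
instance (calculate : String) (out : String) : Decidable (Spec_add_romans calculate out) := by
  unfold Spec_add_romans; infer_instance

-- ===== CLAIM (what is proved, stated in full; the proofs are below) =====
def Claim_equal_add_romans : Prop := ∀ (calculate : String), Dom_add_romans calculate → Pre_add_romans calculate → Spec_add_romans calculate (add_romans calculate)

-- ===== LEMMAS AND PROOFS =====

theorem pvVal_eq (c : Char) : pvConvA.getD c 0 = pvValB c := rfl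

theorem pvValB_mem (c : Char) :
    pvValB c ∈ ([0,1,5,10,50,100,500,1000] : List Int) := by
  unfold pvValB
  rw [PySem.Dict.getD_eq_get?_getD]
  cases h : pvValsB.get? c with
  | none => simp
  | some v =>
    have hm : (c, v) ∈ pvValsB.items := PySem.Dict.mem_items_of_get?_eq_some _ h
    have hit : pvValsB.items =
        [('I',1),('V',5),('X',10),('L',50),('C',100),('D',500),('M',1000)] := rfl
    rw [hit] at hm
    simp only [List.mem_cons, List.not_mem_nil, or_false, Prod.mk.injEq] at hm
    simp only [Option.getD_some]
    rcases hm with ⟨_,rfl⟩|⟨_,rfl⟩|⟨_,rfl⟩|⟨_,rfl⟩|⟨_,rfl⟩|⟨_,rfl⟩|⟨_,rfl⟩ <;> decide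

theorem pvValB_nonneg (c : Char) : 0 ≤ pvValB c := by
  have h := pvValB_mem c
  simp only [List.mem_cons, List.not_mem_nil, or_false] at h
  rcases h with h|h|h|h|h|h|h|h <;> omega

theorem pvValB_double {c d : Char} (h : pvValB c < pvValB d) :
    2 * pvValB c ≤ pvValB d := by
  have hc := pvValB_mem c
  have hd := pvValB_mem d
  simp only [List.mem_cons, List.not_mem_nil, or_false] at hc hd
  rcases hc with hc|hc|hc|hc|hc|hc|hc|hc <;>
    rcases hd with hd|hd|hd|hd|hd|hd|hd|hd <;> omega

def pvHeadVal : List Char → Int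
  | [] => 0
  | c :: _ => pvValB c

theorem pvRev (l : List Char) :
    l.reverse.foldl pvStepA (0, 0) = (pvRomToAra l, pvHeadVal l) := by
  induction l with
  | nil => rfl
  | cons c t ih =>
    rw [List.reverse_cons, List.foldl_append, ih]
    cases t with
    | nil =>
      simp only [List.foldl_cons, List.foldl_nil, pvStepA, pvVal_eq, pvRomToAra,
        pvHeadVal, Prod.mk.injEq]
      refine ⟨?_, trivial⟩
      rw [if_pos (show pvValB c ≥ 0 from pvValB_nonneg c)]
      omega
    | cons d t' =>
      simp only [List.foldl_cons, List.foldl_nil, pvStepA, pvVal_eq, pvRomToAra,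
        pvHeadVal, Prod.mk.injEq]
      refine ⟨?_, trivial⟩
      split_ifs <;> omega

theorem conv_rom_ara_eq (p : String) : conv_rom_ara p = pvRomToAra p.toList := by
  unfold conv_rom_ara; rw [pvRev]

theorem pvRomToAra_ge_head (l : List Char) : pvHeadVal l ≤ pvRomToAra l := by
  induction l with
  | nil => simp [pvHeadVal, pvRomToAra]
  | cons c t ih =>
    cases t with
    | nil => simp [pvHeadVal, pvRomToAra]
    | cons d t' =>
      simp only [pvHeadVal, pvRomToAra] at *
      by_cases h : pvValB c < pvValB d
      · have := pvValB_double h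
        rw [if_pos h]; omega
      · have := pvValB_nonneg d
        rw [if_neg h]; omega

theorem pvRomToAra_nonneg (l : List Char) : 0 ≤ pvRomToAra l := by
  have h := pvRomToAra_ge_head l
  cases l with
  | nil => simp [pvRomToAra]
  | cons c t => have := pvValB_nonneg c; simp only [pvHeadVal] at h; omega

theorem pvSum_eq (parts : List String) (init : Int) :
    parts.foldl (fun acc number => acc + conv_rom_ara number) init =
      init + (parts.map (fun p => pvRomToAra p.toList)).sum := by
  induction parts generalizing init with
  | nil => simp
  | cons p t ih =>
    rw [List.foldl_cons, ih, List.map_cons, List.sum_cons, conv_rom_ara_eq]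
    ring

theorem pvSum_nonneg (parts : List String) :
    0 ≤ (parts.map (fun p => pvRomToAra p.toList)).sum := by
  apply List.sum_nonneg
  intro x hx
  simp only [List.mem_map] at hx
  obtain ⟨p, _, rfl⟩ := hx
  exact pvRomToAra_nonneg _

-- the accumulator of the greedy loop only grows on the left
theorem pvAcc (L : List (List Char × Int)) (acc : List Char) (r : Int) :
    L.foldl pvStepB (acc, r) =
      (acc ++ (L.foldl pvStepB ([], r)).1, (L.foldl pvStepB ([], r)).2) := by
  induction L generalizing acc r with
  | nil => simp
  | cons kv t ih =>
    simp only [List.foldl_cons, pvStepB]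
    rw [ih, ih (([] : List Char) ++ _)]
    simp

def pvRest : List (List Char × Int) :=
  [(['C','M'],900),(['D'],500),(['C','D'],400),(['C'],100),(['X','C'],90),
   (['L'],50),(['X','L'],40),(['X'],10),(['I','X'],9),(['V'],5),(['I','V'],4),(['I'],1)]

def pvTail (r : Int) : List Char := (pvRest.foldl pvStepB ([], r)).1

def pvLow (r : Int) : List Char :=
  PySem.List.pyGetD pvHundreds (PySem.Int.mod (PySem.Int.floordiv r 100) 10) [] ++
  PySem.List.pyGetD pvTens (PySem.Int.mod (PySem.Int.floordiv r 10) 10) [] ++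
  PySem.List.pyGetD pvUnits (PySem.Int.mod r 10) []

set_option maxRecDepth 20000 in
theorem pvChunk0 : ∀ m : Nat, m < 250 → pvTail (Int.ofNat m) = pvLow (Int.ofNat m) := by decide
set_option maxRecDepth 20000 in
theorem pvChunk1 : ∀ m : Nat, m < 250 → pvTail (Int.ofNat (m + 250)) = pvLow (Int.ofNat (m + 250)) := by decide
set_option maxRecDepth 20000 in
theorem pvChunk2 : ∀ m : Nat, m < 250 → pvTail (Int.ofNat (m + 500)) = pvLow (Int.ofNat (m + 500)) := by decide
set_option maxRecDepth 20000 in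
theorem pvChunk3 : ∀ m : Nat, m < 250 → pvTail (Int.ofNat (m + 750)) = pvLow (Int.ofNat (m + 750)) := by decide

theorem pvTail_eq_low (r : Int) (h0 : 0 ≤ r) (h1 : r < 1000) : pvTail r = pvLow r := by
  rcases lt_or_ge r 250 with h | h
  · have := pvChunk0 r.toNat (by omega)
    have e : Int.ofNat r.toNat = r := by
      simp only [Int.ofNat_eq_natCast]; omega
    rwa [e] at this
  rcases lt_or_ge r 500 with h' | h'
  · have := pvChunk1 (r - 250).toNat (by omega)
    have e : Int.ofNat ((r - 250).toNat + 250) = r := by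
      simp only [Int.ofNat_eq_natCast]; push_cast; omega
    rwa [e] at this
  rcases lt_or_ge r 750 with h'' | h''
  · have := pvChunk2 (r - 500).toNat (by omega)
    have e : Int.ofNat ((r - 500).toNat + 500) = r := by
      simp only [Int.ofNat_eq_natCast]; push_cast; omega
    rwa [e] at this
  · have := pvChunk3 (r - 750).toNat (by omega)
    have e : Int.ofNat ((r - 750).toNat + 750) = r := by
      simp only [Int.ofNat_eq_natCast]; push_cast; omega
    rwa [e] at this

theorem conv_eq_table (n : Int) (h0 : 0 ≤ n) (h1 : n ≤ 3999) :
    conv_ara_rom n = pvTable n := by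
  unfold conv_ara_rom pvTable
  have hconv : pvConv2 = (['M'], (1000:Int)) :: pvRest := rfl
  rw [hconv, List.foldl_cons]
  have hd : PySem.Int.floordiv n 1000 = n / 1000 :=
    PySem.Int.floordiv_eq_ediv_of_pos (by norm_num)
  have hstep : pvStepB ([], n) (['M'], 1000) =
      (PySem.List.pyRepeat ['M'] (n / 1000), n - n / 1000 * 1000) := by
    simp [pvStepB]
  rw [hstep, pvAcc]
  have hrem : n - n / 1000 * 1000 = n % 1000 := by omega
  rw [hrem]
  have hlow := pvTail_eq_low (n % 1000) (by omega) (by omega)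
  unfold pvTail at hlow
  rw [hlow]
  congr 1
  have hM : PySem.List.pyRepeat ['M'] (n / 1000) =
      PySem.List.pyGetD pvThousands (PySem.Int.floordiv n 1000) [] := by
    rw [hd]
    have hq0 : 0 ≤ n / 1000 := by omega
    have hq3 : n / 1000 ≤ 3 := by omega
    interval_cases h : (n / 1000) <;> decide
  rw [hM]
  unfold pvLow
  have e1 : PySem.Int.mod (PySem.Int.floordiv (n % 1000) 100) 10 =
      PySem.Int.mod (PySem.Int.floordiv n 100) 10 := by
    rw [PySem.Int.floordiv_eq_ediv_of_pos (by norm_num),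
        PySem.Int.floordiv_eq_ediv_of_pos (by norm_num),
        PySem.Int.mod_eq_emod_of_pos (by norm_num),
        PySem.Int.mod_eq_emod_of_pos (by norm_num)]
    omega
  have e2 : PySem.Int.mod (PySem.Int.floordiv (n % 1000) 10) 10 =
      PySem.Int.mod (PySem.Int.floordiv n 10) 10 := by
    rw [PySem.Int.floordiv_eq_ediv_of_pos (by norm_num),
        PySem.Int.floordiv_eq_ediv_of_pos (by norm_num),
        PySem.Int.mod_eq_emod_of_pos (by norm_num),
        PySem.Int.mod_eq_emod_of_pos (by norm_num)]
    omega
  have e3 : PySem.Int.mod (n % 1000) 10 = PySem.Int.mod n 10 := by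
    rw [PySem.Int.mod_eq_emod_of_pos (by norm_num),
        PySem.Int.mod_eq_emod_of_pos (by norm_num)]
    omega
  rw [e1, e2, e3]
  simp [List.append_assoc]

-- ===== VERDICT (by name: the statement is the Claim_ definition above) =====
theorem add_romans_spec : Claim_equal_add_romans := by
  intro s _ _
  unfold Spec_add_romans add_romans add_romans_alt
  simp only [pvSum_eq, zero_add]
  set total := ((((PySem.Str.split? s "+").getD []).map (fun p => pvRomToAra p.toList)).sum) with ht
  by_cases h : total > 3999
  · rw [if_pos h, if_pos h]
  · rw [if_neg h, if_neg h]
    exact conv_eq_table total (pvSum_nonneg _) (by omega)
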